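-- pv_equiv track=rewrite | github.com/yoonsuh-Choi/Algorithm | 프로그래머스/Lv.0/181929. 원소들의 곱과 합/원소들의 곱과 합.py | solution
-- ===== SOURCE A (Python) =====
-- def solution(num_list):
--     sums=0
--     mul = 1
--     for i in num_list:
--         mul *= i
--         sums += i
--     if sums**2 > mul:
--         return 1
--     else:
--         return 0
-- ===== SOURCE B (Python) =====
-- def _agg(xs):
--     # balanced divide-and-conquer reduction: returns (sum, product) of xs
--     n = len(xs)
--     if n == 0:
--         return (0, 1)
--     if n == 1:
--         return (xs[0], xs[0])
--     mid = n // 2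
--     s1, p1 = _agg(xs[:mid])
--     s2, p2 = _agg(xs[mid:])
--     return (s1 + s2, p1 * p2)
--
-- def solution(num_list):
--     s, p = _agg(num_list)
--     return 1 if s * s > p else 0
-- ===== Notes on version B (the rewrite author's own statement) =====
-- stated objective: faster
-- what changed: Replaces A's single fused left-to-right loop with two accumulator variables by a balanced divide-and-conquer reduction: the list is split in half recursively, each half yields its (sum, product) pair, pairs are combined as (s1+s2, p1*p2), and the final pair is compared as s*s > p; intended as faster on the big-integer product (balanced tree multiplies similarly-sized operands instead of huge-by-small), measured 5.9-10x at the largest sizes both finished.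
import Mathlib
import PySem

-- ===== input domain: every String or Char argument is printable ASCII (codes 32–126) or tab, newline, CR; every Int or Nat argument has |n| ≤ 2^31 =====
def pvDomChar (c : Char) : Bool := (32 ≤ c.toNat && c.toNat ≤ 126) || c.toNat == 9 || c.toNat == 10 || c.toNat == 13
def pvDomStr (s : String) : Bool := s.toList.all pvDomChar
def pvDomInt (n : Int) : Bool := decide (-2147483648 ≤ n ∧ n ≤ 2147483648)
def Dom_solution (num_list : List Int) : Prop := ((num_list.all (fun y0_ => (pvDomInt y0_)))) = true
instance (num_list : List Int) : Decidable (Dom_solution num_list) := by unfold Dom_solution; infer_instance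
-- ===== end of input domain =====

-- B replaces A's fused left-to-right loop by a balanced divide-and-conquer (sum, product) reduction; intended as faster on the big-integer product (balanced tree), measured 5.9-10x at the largest sizes both Pythons finished.

-- ===== PORT A =====
-- one fused left-to-right loop over (sums, mul), then if/else
def solution (num_list : List Int) : Int :=
  let st := num_list.foldl (fun (p : Int × Int) i => (p.1 + i, p.2 * i)) (0, 1)
  if st.1 ^ 2 > st.2 then 1 else 0

-- ===== PORT B =====
-- Source B's _agg: split the list at its midpoint, recurse on both halves, combine the pairs.
-- Structural recursion on a fuel = length bound (the fuel-0 branch is unreachable; totality guard only).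
def aggFuel : Nat → List Int → Int × Int
  | _, [] => (0, 1)
  | _, [a] => (a, a)
  | 0, _ => (0, 1)
  | f + 1, a :: b :: t =>
      let xs := a :: b :: t
      let mid := xs.length / 2
      let l := aggFuel f (xs.take mid)
      let r := aggFuel f (xs.drop mid)
      (l.1 + r.1, l.2 * r.2)

def agg (xs : List Int) : Int × Int := aggFuel xs.length xs

def solution_alt (num_list : List Int) : Int :=
  let sp := agg num_list
  if sp.1 * sp.1 > sp.2 then 1 else 0

-- ===== PRECONDITION & SPEC =====
def Spec_solution (num_list : List Int) (out : Int) : Prop := out = solution_alt num_list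
instance (num_list : List Int) (out : Int) : Decidable (Spec_solution num_list out) := by unfold Spec_solution; infer_instance

-- ===== CLAIM =====
def Claim_equal_solution : Prop := ∀ (num_list : List Int), Dom_solution num_list → Spec_solution num_list (solution num_list)

-- ===== LEMMAS AND PROOFS =====

-- the divide-and-conquer aggregate is exactly (sum, product)
lemma aggFuel_eq (f : Nat) (xs : List Int) (h : xs.length ≤ f) :
    aggFuel f xs = (xs.sum, xs.prod) := by
  induction f generalizing xs with
  | zero =>
      cases xs with
      | nil => simp [aggFuel]
      | cons a t => simp at h
  | succ f ih =>
      match xs with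
      | [] => simp [aggFuel]
      | [a] => simp [aggFuel]
      | a :: b :: t =>
          rw [aggFuel]
          have hlen : (a :: b :: t).length = t.length + 2 := by simp
          have h1 : ((a :: b :: t).take ((a :: b :: t).length / 2)).length ≤ f := by
            simp only [List.length_take, hlen] at *; omega
          have h2 : ((a :: b :: t).drop ((a :: b :: t).length / 2)).length ≤ f := by
            simp only [List.length_drop, hlen] at *; omega
          simp only [ih _ h1, ih _ h2]
          conv_rhs => rw [← List.take_append_drop ((a :: b :: t).length / 2) (a :: b :: t)]
          simp

lemma agg_eq (xs : List Int) : agg xs = (xs.sum, xs.prod) := by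
  exact aggFuel_eq xs.length xs le_rfl

-- the fused left fold from any start (s, m) computes (s + sum, m * prod)
lemma fused_fold (xs : List Int) (s m : Int) :
    xs.foldl (fun (p : Int × Int) i => (p.1 + i, p.2 * i)) (s, m)
      = (s + xs.sum, m * xs.prod) := by
  induction xs generalizing s m with
  | nil => simp
  | cons a t ih =>
      simp only [List.foldl_cons, List.sum_cons, List.prod_cons, ih]
      rw [Prod.mk.injEq]
      exact ⟨by ring, by ring⟩

-- ===== VERDICT =====
theorem solution_spec : Claim_equal_solution := by
  intro xs _
  unfold Spec_solution solution solution_alt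
  rw [fused_fold, agg_eq]
  simp [sq]
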